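-- pv_equiv track=rewrite | github.com/ericssimpson/voting-analysis-tools | rcv_m.py | anti_plurality
-- ===== SOURCE A (Python) =====
-- from typing import Dict, List, Tuple, Union
--
-- def anti_plurality(ballots: Dict[Tuple, int], candidates: List[str]) -> str:
--     """
--     This function implements the Anti-plurality voting method.
--
--     Parameters:
--     ballots (dict): A dictionary where each key is a tuple representing a ballot (ordered candidate preferences) and the value is the number of such ballots.
--     candidates (list): A list of candidates.
--
--     Returns:
--     candidate: The winner of the election.
--
--     """
--     # Initialize an empty dictionary to store candidate positions
--     candidate_positions = {}
--
--     # Count the total number of votes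
--     total_votes = sum(ballots.values())
--
--     # Iterate over the ballots
--     for ballot, count in ballots.items():
--         # Add the count to each candidate's position
--         for index, candidate in enumerate(ballot):
--             candidate_positions.setdefault((index, candidate), 0)
--             candidate_positions[(index, candidate)] += count
--
--     # Reverse iterate over the range of the number of candidates
--     for i in range(len(candidates) - 1, -1, -1):
--         min_votes = total_votes  # Initialize the minimum votes as the total votes
--
--         # Set the count to 0 for candidates that don't appear in the current position
--         for candidate in candidates:
--             candidate_positions.setdefault((i, candidate), 0)
--             if candidate_positions[(i, candidate)] < min_votes:
--                 min_votes = candidate_positions[(i, candidate)]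
--
--         # Remove candidates with more than the minimum votes from the candidate list
--         candidates = [candidate for candidate in candidates if candidate_positions[(i, candidate)] == min_votes]
--
--         # If only one candidate is left, break the loop
--         if len(candidates) == 1:
--             break
--
--     # Return the remaining candidate as the winner
--     return candidates[0]
-- ===== SOURCE B (Python) =====
-- def anti_plurality(ballots, candidates):
--     # One-pass positional count per candidate, then a single lexicographic argmin
--     # over the counts read from the last position down to the first.
--     n = len(candidates)
--     counts = {c: [0] * n for c in candidates}
--     for ballot, count in ballots.items():
--         for pos, cand in enumerate(ballot):
--             if pos < n and cand in counts:
--                 counts[cand][pos] += count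
--     def key(c):
--         return tuple(counts[c][n - 1 - i] for i in range(n))
--     return min(candidates, key=key)
-- ===== Notes on version B (the rewrite author's own statement) =====
-- stated objective: simpler
-- what changed: A's backward positional elimination loop (repeated setdefault/min/filter passes over a (position,candidate)-keyed dict with an early break) is replaced by one counting pass into a per-candidate list of positional counts followed by a single lexicographic argmin over the counts read from the last position down to the first (Python min with a tuple key), which returns the first candidate in list order on full ties exactly like A.
-- outside the precondition, e.g. on anti_plurality({('a', 'b'): 2, ('b', 'a'): 2, ('a',): -3}, ['a', 'b']): A raises IndexError, B returns 'a'; on anti_plurality({('a',): -1}, ['a']): A returns 'a', B returns 'a'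
import Mathlib
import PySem

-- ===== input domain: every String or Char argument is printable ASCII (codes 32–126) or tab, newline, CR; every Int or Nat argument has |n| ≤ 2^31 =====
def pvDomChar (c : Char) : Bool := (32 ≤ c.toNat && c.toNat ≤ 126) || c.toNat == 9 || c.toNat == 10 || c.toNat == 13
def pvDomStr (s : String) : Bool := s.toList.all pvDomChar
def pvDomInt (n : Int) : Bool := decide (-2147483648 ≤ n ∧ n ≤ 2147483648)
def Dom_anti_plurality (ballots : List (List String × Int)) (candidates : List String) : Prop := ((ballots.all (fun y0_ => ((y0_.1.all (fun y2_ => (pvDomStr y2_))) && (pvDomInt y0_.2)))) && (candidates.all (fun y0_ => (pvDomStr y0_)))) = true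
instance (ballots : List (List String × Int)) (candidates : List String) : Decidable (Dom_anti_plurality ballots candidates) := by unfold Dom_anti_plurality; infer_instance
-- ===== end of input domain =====

-- B replaces A's backward elimination cascade by one positional count per candidate and a
-- single lexicographic argmin (objective: simpler).

-- B replaces A's backward elimination cascade by one positional count per candidate and a
-- single lexicographic argmin over the reversed count tuples (objective: simpler).

-- ===== PORT A =====
-- candidate_positions.setdefault((index, candidate), 0); candidate_positions[(index, candidate)] += count
def apStep (k : Int) (cp : PySem.Dict (Int × String) Int) (ic : Int × String) : PySem.Dict (Int × String) Int :=
  (cp.setdefault ic 0).modify ic 0 (fun v => v + k)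

-- the ballot-counting double loop
def apBuild (ballots : List (List String × Int)) : PySem.Dict (Int × String) Int :=
  ballots.foldl (fun cp bc => (PySem.List.enumerate bc.1).foldl (apStep bc.2) cp) PySem.Dict.empty

-- inner 'for candidate in candidates' loop: setdefault + running minimum
def apScan (i : Int) (total : Int) (cands : List String) (cp : PySem.Dict (Int × String) Int) :
    PySem.Dict (Int × String) Int × Int :=
  cands.foldl (fun s c =>
    let cp2 := s.1.setdefault (i, c) 0
    (cp2, if cp2.getD (i, c) 0 < s.2 then cp2.getD (i, c) 0 else s.2)) (cp, total)

-- 'for i in range(len(candidates)-1, -1, -1)' with the break on a single survivor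
def apElim (total : Int) : List Int → List String → PySem.Dict (Int × String) Int → List String
  | [], cands, _ => cands
  | i :: rest, cands, cp =>
      let s := apScan i total cands cp
      let cands2 := cands.filter (fun c => s.1.getD (i, c) 0 == s.2)
      if cands2.length == 1 then cands2 else apElim total rest cands2 s.1

def anti_plurality (ballots : List (List String × Int)) (candidates : List String) : String :=
  let cp := apBuild ballots
  let total := (ballots.map (fun p => p.2)).sum
  let winners := apElim total (PySem.List.pyRange ((candidates.length : Int) - 1) (-1) (-1)) candidates cp
  ((PySem.List.pyGet? winners 0).getD "")  -- candidates[0]; the IndexError case is excluded by Pre_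

-- ===== PORT B =====
-- Python tuple '<' (Source B compares the reversed count tuples)
def tupLt : List Int → List Int → Bool
  | _, [] => false
  | [], _ :: _ => true
  | x :: xs, y :: ys => x < y || (x == y && tupLt xs ys)

-- key(c) = tuple(counts[c][n-1-i] for i in range(n))
def altKey (counts : PySem.Dict String (List Int)) (n : Nat) (c : String) : List Int :=
  (PySem.List.pyRange 0 (n : Int) 1).map (fun i => PySem.List.pyGetD (counts.getD c []) ((n : Int) - 1 - i) 0)

def anti_plurality_alt (ballots : List (List String × Int)) (candidates : List String) : String :=
  let n := candidates.length
  let counts0 := candidates.foldl (fun d c => d.insert c (List.replicate n (0 : Int))) PySem.Dict.empty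
  let counts := ballots.foldl (fun d bc =>
    (PySem.List.enumerate bc.1).foldl (fun d pc =>
      if pc.1 < (n : Int) && d.contains pc.2 then
        d.modify pc.2 [] (fun l => PySem.List.pySetD l pc.1 (PySem.List.pyGetD l pc.1 0 + bc.2))
      else d) d) counts0
  match candidates with
  | [] => ""   -- min() of an empty list raises ValueError; excluded by Pre_
  | c0 :: rest =>
      rest.foldl (fun best c => if tupLt (altKey counts n c) (altKey counts n best) then c else best) c0

-- ===== PRECONDITION & SPEC =====
-- Pre_ excludes an empty candidate list (A raises IndexError, B's min raises ValueError) and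
-- ballots with a negative multiplicity, on which A's running minimum initialised to the vote
-- total can leave the filtered candidate list empty and later raise IndexError.
def Pre_anti_plurality (ballots : List (List String × Int)) (candidates : List String) : Prop :=
  candidates ≠ [] ∧ ∀ p ∈ ballots, 0 ≤ p.2
instance (ballots : List (List String × Int)) (candidates : List String) : Decidable (Pre_anti_plurality ballots candidates) := by unfold Pre_anti_plurality; infer_instance

def pvWitness_anti_plurality : (List (List String × Int)) × List String :=
  ([(["a", "b"], 1), (["b", "a"], 2)], ["a", "b"])

def Spec_anti_plurality (ballots : List (List String × Int)) (candidates : List String) (out : String) : Prop := out = anti_plurality_alt ballots candidates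
instance (ballots : List (List String × Int)) (candidates : List String) (out : String) : Decidable (Spec_anti_plurality ballots candidates out) := by unfold Spec_anti_plurality; infer_instance

-- ===== CLAIM (what is proved, stated in full; the proofs are below) =====
def Claim_equal_anti_plurality : Prop := ∀ (ballots : List (List String × Int)) (candidates : List String), Dom_anti_plurality ballots candidates → Pre_anti_plurality ballots candidates → Spec_anti_plurality ballots candidates (anti_plurality ballots candidates)

-- ===== LEMMAS AND PROOFS =====

-- the semantic per-position count: cnt i c = weighted number of ballots whose i-th entry is c
def cnt (bs : List (List String × Int)) (i : Nat) (c : String) : Int :=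
  (bs.map (fun p => if p.1[i]? = some c then p.2 else 0)).sum

-- the common key: counts read from the last position down to the first
def keyv (bs : List (List String × Int)) (n : Nat) (c : String) : List Int :=
  (List.range n).map (fun j => cnt bs (n - 1 - j) c)

-- c has a lexicographically minimal key among cs
def minimalIn (k : String → List Int) (cs : List String) (c : String) : Bool :=
  cs.all (fun c' => ! tupLt (k c') (k c))

theorem tupLt_irrefl (l : List Int) : tupLt l l = false := by
  induction l with
  | nil => rfl
  | cons x xs ih => simp [tupLt, ih]

theorem tupLt_trans {a b c : List Int} (h1 : tupLt a b = true) (h2 : tupLt b c = true) :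
    tupLt a c = true := by
  induction a generalizing b c with
  | nil =>
    cases b with
    | nil => cases c with | nil => exact h2 | cons z zs => rfl
    | cons y ys => cases c with | nil => exact absurd h2 (by simp [tupLt]) | cons z zs => rfl
  | cons x xs ih =>
    cases b with
    | nil => exact absurd h1 (by simp [tupLt])
    | cons y ys =>
      cases c with
      | nil => exact absurd h2 (by simp [tupLt])
      | cons z zs =>
        simp only [tupLt, Bool.or_eq_true, Bool.and_eq_true, beq_iff_eq, decide_eq_true_eq] at *
        rcases h1 with h1 | ⟨rfl, h1⟩ <;> rcases h2 with h2 | ⟨rfl, h2⟩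
        · exact Or.inl (lt_trans h1 h2)
        · exact Or.inl h1
        · exact Or.inl h2
        · exact Or.inr ⟨rfl, ih h1 h2⟩

theorem tupLt_eq_of_not {a b : List Int} (hlen : a.length = b.length)
    (h1 : tupLt a b = false) (h2 : tupLt b a = false) : a = b := by
  induction a generalizing b with
  | nil => cases b with | nil => rfl | cons y ys => simp at hlen
  | cons x xs ih =>
    cases b with
    | nil => simp at hlen
    | cons y ys =>
      simp only [tupLt, Bool.or_eq_false_iff, Bool.and_eq_false_iff] at h1 h2
      have hxy : x = y := by
        rcases h1 with ⟨h1a, _⟩; rcases h2 with ⟨h2a, _⟩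
        simp only [decide_eq_false_iff_not] at h1a h2a; omega
      subst hxy
      rcases h1 with ⟨-, h1b⟩; rcases h2 with ⟨-, h2b⟩
      simp only [beq_self_eq_true, Bool.true_eq_false, false_or] at h1b h2b
      have := ih (by simpa using hlen) (by simpa using h1b) (by simpa using h2b)
      rw [this]

theorem setdefault_eq {κ ν : Type} [BEq κ] (d : PySem.Dict κ ν) (k : κ) (v : ν) :
    d.setdefault k v = if d.contains k then d else d.insert k v := by
  unfold PySem.Dict.setdefault
  split
  · rfl
  · rename_i h
    have h2 := PySem.Dict.items_insert_of_not_contains d (k := k) v (by simpa using h)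
    exact congrArg PySem.Dict.mk h2.symm

theorem getD_setdefault_zero (d : PySem.Dict (Int × String) Int) (k k' : Int × String) :
    (d.setdefault k 0).getD k' 0 = d.getD k' 0 := by
  rw [setdefault_eq]
  split
  · rfl
  · rename_i h
    rw [PySem.Dict.getD_insert]
    split
    · rename_i he; subst he
      rw [PySem.Dict.getD_of_not_contains d 0 (by simpa using h)]
    · rfl

theorem apStep_getD (k : Int) (cp : PySem.Dict (Int × String) Int) (ic ic' : Int × String) :
    (apStep k cp ic).getD ic' 0 = cp.getD ic' 0 + (if ic' = ic then k else 0) := by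
  unfold apStep
  rw [PySem.Dict.getD_modify]
  by_cases h : ic' = ic
  · subst h; simp [getD_setdefault_zero]
  · simp [h, getD_setdefault_zero]

theorem enum_fold_getD (k : Int) (b : List String) (s : Int) (cp : PySem.Dict (Int × String) Int)
    (ic : Int × String) :
    ((PySem.List.enumerate b s).foldl (apStep k) cp).getD ic 0
      = cp.getD ic 0 + (if ic ∈ PySem.List.enumerate b s then k else 0) := by
  induction b generalizing s cp with
  | nil => simp [PySem.List.enumerate_nil]
  | cons x xs ih =>
    rw [PySem.List.enumerate_cons]
    simp only [List.foldl_cons, ih, apStep_getD, List.mem_cons]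
    by_cases h : ic = (s, x)
    · have hnm : ic ∉ PySem.List.enumerate xs (s + 1) := by
        intro hm
        rw [PySem.List.mem_enumerate_iff] at hm
        obtain ⟨k', hk', he⟩ := hm
        have : ic.1 = s + 1 + (k' : Int) := by rw [he]
        subst h; simp at this; omega
      subst h; simp [hnm]
    · simp [h]

theorem apBuild_aux (bs : List (List String × Int)) (i : Nat) (c : String)
    (cp : PySem.Dict (Int × String) Int) :
    (bs.foldl (fun cp bc => (PySem.List.enumerate bc.1).foldl (apStep bc.2) cp) cp).getD ((i : Int), c) 0
      = cp.getD ((i : Int), c) 0 + cnt bs i c := by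
  induction bs generalizing cp with
  | nil => simp [cnt]
  | cons b bs ih =>
    simp only [List.foldl_cons, ih, enum_fold_getD]
    have hmem : ((i : Int), c) ∈ PySem.List.enumerate b.1 0 ↔ b.1[i]? = some c := by
      rw [PySem.List.mem_enumerate_iff]
      constructor
      · rintro ⟨k', hk', he⟩
        have h1 : (i : Int) = 0 + (k' : Int) := congrArg Prod.fst he
        have h2 : k' = i := by omega
        subst h2
        have : c = b.1[k'] := congrArg Prod.snd he
        simp [List.getElem?_eq_some_iff, hk', this.symm]
      · intro h
        rw [List.getElem?_eq_some_iff] at h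
        obtain ⟨hlt, he⟩ := h
        exact ⟨i, hlt, by simp [he]⟩
    by_cases h : b.1[i]? = some c
    · simp [cnt, hmem, h, add_comm, add_assoc, add_left_comm]
    · simp [cnt, hmem, h, add_comm, add_assoc, add_left_comm]

theorem apBuild_getD (bs : List (List String × Int)) (i : Nat) (c : String) :
    (apBuild bs).getD ((i : Int), c) 0 = cnt bs i c := by
  unfold apBuild; rw [apBuild_aux]; simp [PySem.Dict.getD_empty]

theorem apScan_fst_getD (i : Int) (total : Int) (cands : List String)
    (cp : PySem.Dict (Int × String) Int) (ic : Int × String) :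
    ((apScan i total cands cp).1).getD ic 0 = cp.getD ic 0 := by
  unfold apScan
  induction cands generalizing cp total with
  | nil => rfl
  | cons c cs ih => simp only [List.foldl_cons]; rw [ih]; exact getD_setdefault_zero _ _ _

theorem apScan_snd (i : Int) (total : Int) (cands : List String)
    (cp : PySem.Dict (Int × String) Int) :
    (apScan i total cands cp).2
      = cands.foldl (fun m c => if cp.getD (i, c) 0 < m then cp.getD (i, c) 0 else m) total := by
  unfold apScan
  induction cands generalizing cp total with
  | nil => rfl
  | cons c cs ih =>
    simp only [List.foldl_cons]
    rw [ih, getD_setdefault_zero]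
    apply PySem.List.foldl_congr_mem
    intro acc x hx
    rw [getD_setdefault_zero]

theorem foldl_min_spec (f : String → Int) (cands : List String) (a : Int)
    (hle : ∀ c ∈ cands, f c ≤ a) (hne : cands ≠ []) :
    (∃ c ∈ cands, f c = cands.foldl (fun m c => if f c < m then f c else m) a)
      ∧ ∀ c ∈ cands, cands.foldl (fun m c => if f c < m then f c else m) a ≤ f c := by
  have key : ∀ (l : List String) (a : Int),
      (l.foldl (fun m c => if f c < m then f c else m) a = a ∨
        ∃ c ∈ l, f c = l.foldl (fun m c => if f c < m then f c else m) a)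
      ∧ (l.foldl (fun m c => if f c < m then f c else m) a ≤ a)
      ∧ ∀ c ∈ l, l.foldl (fun m c => if f c < m then f c else m) a ≤ f c := by
    intro l
    induction l with
    | nil => simp
    | cons c cs ih =>
      intro a
      simp only [List.foldl_cons, List.mem_cons]
      by_cases h : f c < a
      · simp only [if_pos h]
        refine ⟨?_, ?_, ?_⟩
        · rcases (ih (f c)).1 with h1 | ⟨c', hc', he⟩
          · exact Or.inr ⟨c, Or.inl rfl, h1.symm⟩
          · exact Or.inr ⟨c', Or.inr hc', he⟩
        · exact le_trans (ih (f c)).2.1 (le_of_lt h)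
        · intro x hx
          rcases hx with h' | hx
          · subst h'; exact (ih (f x)).2.1
          · exact (ih (f c)).2.2 x hx
      · simp only [if_neg h]
        refine ⟨?_, ?_, ?_⟩
        · rcases (ih a).1 with h1 | ⟨c', hc', he⟩
          · exact Or.inl h1
          · exact Or.inr ⟨c', Or.inr hc', he⟩
        · exact (ih a).2.1
        · intro x hx
          rcases hx with h' | hx
          · subst h'; exact le_trans (ih a).2.1 (by omega)
          · exact (ih a).2.2 x hx
  refine ⟨?_, (key cands a).2.2⟩
  rcases (key cands a).1 with h1 | h2
  · -- result = a : every f c equals a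
    obtain ⟨c, hc⟩ := List.exists_mem_of_ne_nil cands hne
    refine ⟨c, hc, ?_⟩
    have := (key cands a).2.2 c hc
    have := hle c hc
    omega
  · exact h2

theorem apElim_eq_filter (total : Int) (g : Int → String → Int) (is : List Int)
    (cs : List String) (cp : PySem.Dict (Int × String) Int) (hne : cs ≠ [])
    (hg : ∀ i ∈ is, ∀ c, cp.getD (i, c) 0 = g i c)
    (hb : ∀ i ∈ is, ∀ c, g i c ≤ total) :
    apElim total is cs cp = cs.filter (minimalIn (fun c => is.map (fun i => g i c)) cs) := by
  induction is generalizing cs cp with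
  | nil =>
    rw [apElim, Eq.comm, List.filter_eq_self]
    intro c hc
    simp [minimalIn, tupLt]
  | cons i rest ih =>
    have hgi : ∀ c, cp.getD (i, c) 0 = g i c := hg i (List.mem_cons_self ..)
    -- the scanned minimum is the minimum of g i over cs
    have hsnd : (apScan i total cs cp).2
        = cs.foldl (fun m c => if g i c < m then g i c else m) total := by
      rw [apScan_snd]; simp only [hgi]
    set M := cs.foldl (fun m c => if g i c < m then g i c else m) total with hM
    obtain ⟨⟨c₀, hc₀, hfc₀⟩, hmin⟩ :=
      foldl_min_spec (g i) cs total (fun c _ => hb i (List.mem_cons_self ..) c) hne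
    -- the filtered list
    have hcands2 : cs.filter (fun c => ((apScan i total cs cp).1).getD (i, c) 0 == (apScan i total cs cp).2)
        = cs.filter (fun c => g i c == M) := by
      apply List.filter_congr
      intro c hc
      rw [apScan_fst_getD, hgi, hsnd]
    set cands2 := cs.filter (fun c => g i c == M) with hc2
    have hmem2 : ∀ c, c ∈ cands2 ↔ c ∈ cs ∧ g i c = M := by
      intro c; simp [hc2, List.mem_filter]
    have hne2 : cands2 ≠ [] := by
      intro h
      have : c₀ ∈ cands2 := (hmem2 c₀).mpr ⟨hc₀, hfc₀.symm ▸ rfl⟩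
      rw [h] at this; exact absurd this (List.not_mem_nil)
    -- step identity
    have hstep : cs.filter (minimalIn (fun c => (i :: rest).map (fun i' => g i' c)) cs)
        = cands2.filter (minimalIn (fun c => rest.map (fun i' => g i' c)) cands2) := by
      have hpt : ∀ c ∈ cs, minimalIn (fun c => (i :: rest).map (fun i' => g i' c)) cs c
          = ((g i c == M) && minimalIn (fun c => rest.map (fun i' => g i' c)) cands2 c) := by
        intro c hc
        by_cases h : g i c = M
        · simp only [h, beq_self_eq_true, Bool.true_and]
          rcases hall : minimalIn (fun c => rest.map (fun i' => g i' c)) cands2 c with _ | _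
          · -- RHS false: some c' ∈ cands2 with tupLt; that c' also kills LHS
            rw [minimalIn] at hall ⊢
            rcases List.all_eq_false.mp hall with ⟨c', hc', hlt⟩
            apply List.all_eq_false.mpr
            refine ⟨c', ((hmem2 c').mp hc').1, ?_⟩
            have hlt' : tupLt (List.map (fun i' => g i' c') rest) (List.map (fun i' => g i' c) rest) = true := by
              simpa using hlt
            simp only [List.map_cons, tupLt, ((hmem2 c').mp hc').2, h]
            simp [hlt']
          · rw [minimalIn] at hall ⊢
            apply List.all_eq_true.mpr
            intro c' hc'
            simp only [List.map_cons, tupLt, Bool.not_eq_true', Bool.or_eq_false_iff,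
              Bool.and_eq_false_iff]
            by_cases h' : g i c' = M
            · have : c' ∈ cands2 := (hmem2 c').mpr ⟨hc', h'⟩
              have := List.all_eq_true.mp hall c' this
              simp only [Bool.not_eq_true'] at this
              constructor
              · simp [h', h]
              · right; exact this
            · have : M < g i c' := lt_of_le_of_ne (hmin c' hc') (fun he => h' he.symm)
              constructor
              · simp only [h, decide_eq_false_iff_not]; omega
              · left; simp only [beq_eq_false_iff_ne, ne_eq, h]; omega
        · -- g i c > M: c is not minimal (c₀ beats it), both sides false
          have hMlt : M < g i c := lt_of_le_of_ne (hmin c hc) (fun he => h he.symm)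
          have hR : (g i c == M) = false := by simp [h]
          rw [hR, Bool.false_and, minimalIn]
          apply List.all_eq_false.mpr
          refine ⟨c₀, hc₀, ?_⟩
          have hq : tupLt (List.map (fun i' => g i' c₀) (i :: rest)) (List.map (fun i' => g i' c) (i :: rest)) = true := by
            simp only [List.map_cons, tupLt, Bool.or_eq_true, decide_eq_true_eq]
            left; omega
          rw [List.map_cons, List.map_cons] at hq
          simp [hq]
      calc cs.filter (minimalIn (fun c => (i :: rest).map (fun i' => g i' c)) cs)
          = cs.filter (fun c => (g i c == M) && minimalIn (fun c => rest.map (fun i' => g i' c)) cands2 c) :=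
            List.filter_congr hpt
        _ = cands2.filter (minimalIn (fun c => rest.map (fun i' => g i' c)) cands2) := by
            rw [hc2, List.filter_filter]
            exact List.filter_congr (fun c _ => by rw [Bool.and_comm])
    -- now unfold apElim
    rw [apElim]
    simp only [hcands2, hstep]
    by_cases hlen : cands2.length = 1
    · rw [if_pos (by simpa using hlen)]
      obtain ⟨w, hw⟩ := List.length_eq_one_iff.mp hlen
      rw [hw]
      simp [minimalIn, tupLt_irrefl]
    · rw [if_neg (by simpa using hlen)]
      exact ih cands2 (apScan i total cs cp).1 hne2
        (fun i' hi' c => by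
          rw [apScan_fst_getD]; exact hg i' (List.mem_cons_of_mem _ hi') c)
        (fun i' hi' c => hb i' (List.mem_cons_of_mem _ hi') c)

theorem minimalIn_cons (k : String → List Int) (x : String) (L : List String) (c : String) :
    minimalIn k (x :: L) c = ((! tupLt (k x) (k c)) && minimalIn k L c) := by
  simp [minimalIn]

theorem minimalIn_key_congr (k : String → List Int) (L : List String) {c c' : String}
    (h : k c = k c') : minimalIn k L c = minimalIn k L c' := by
  simp [minimalIn, h]

theorem foldSel (k : String → List Int)
    (hk : ∀ a b, tupLt (k a) (k b) = false → tupLt (k b) (k a) = false → k a = k b)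
    (rest : List String) (c0 : String) :
    some (rest.foldl (fun best c => if tupLt (k c) (k best) then c else best) c0)
      = ((c0 :: rest).filter (minimalIn k (c0 :: rest))).head? := by
  induction rest generalizing c0 with
  | nil => simp [minimalIn, tupLt_irrefl]
  | cons c t ih =>
    simp only [List.foldl_cons]
    by_cases hlt : tupLt (k c) (k c0) = true
    · rw [if_pos hlt, ih c]
      -- drop the dominated c0
      have hc0f : minimalIn k (c0 :: c :: t) c0 = false := by
        simp [minimalIn, hlt]
      have hcong : ∀ y ∈ c :: t, minimalIn k (c0 :: c :: t) y = minimalIn k (c :: t) y := by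
        intro y hy
        rw [minimalIn_cons]
        rcases hsm : minimalIn k (c :: t) y with _ | _
        · simp
        · have hcy : tupLt (k c) (k y) = false := by
            have := (List.all_eq_true.mp hsm) c (List.mem_cons_self ..)
            simpa using this
          have h0y : tupLt (k c0) (k y) = false := by
            rcases h3 : tupLt (k c0) (k y) with _ | _
            · rfl
            · have := tupLt_trans hlt h3
              rw [this] at hcy; exact hcy
          simp [h0y]
      have : (c0 :: c :: t).filter (minimalIn k (c0 :: c :: t))
          = (c :: t).filter (minimalIn k (c :: t)) := by
        rw [List.filter_cons_of_neg (by simp [hc0f])]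
        exact List.filter_congr hcong
      rw [this]
    · rw [if_neg (by simp [hlt]), ih c0]
      have hlt' : tupLt (k c) (k c0) = false := by simpa using hlt
      by_cases h2 : tupLt (k c0) (k c) = true
      · -- c is dominated by c0
        have hcf : minimalIn k (c0 :: c :: t) c = false := by
          simp [minimalIn, h2]
        have hcong : ∀ y ∈ c0 :: t, minimalIn k (c0 :: c :: t) y = minimalIn k (c0 :: t) y := by
          intro y hy
          rw [minimalIn_cons, minimalIn_cons, minimalIn_cons]
          rcases h0y : tupLt (k c0) (k y) with _ | _
          · have hcy : tupLt (k c) (k y) = false := by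
              rcases h3 : tupLt (k c) (k y) with _ | _
              · rfl
              · have := tupLt_trans h2 h3
                rw [this] at h0y; simp at h0y
            simp [hcy]
          · simp
        have ec0 : minimalIn k (c0 :: c :: t) c0 = minimalIn k (c0 :: t) c0 :=
          hcong c0 (List.mem_cons_self ..)
        have ht : t.filter (minimalIn k (c0 :: c :: t)) = t.filter (minimalIn k (c0 :: t)) :=
          List.filter_congr (fun y hy => hcong y (List.mem_cons_of_mem _ hy))
        have : (c0 :: c :: t).filter (minimalIn k (c0 :: c :: t))
            = (c0 :: t).filter (minimalIn k (c0 :: t)) := by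
          simp only [List.filter_cons, ec0, hcf, ht]
          cases hp : minimalIn k (c0 :: t) c0 <;> simp
        rw [this]
      · -- equal keys: first occurrence c0 wins either way
        have h2' : tupLt (k c0) (k c) = false := by simpa using h2
        have hkeq : k c = k c0 := hk c c0 hlt' h2'
        have hcong : ∀ y, minimalIn k (c0 :: c :: t) y = minimalIn k (c0 :: t) y := by
          intro y
          rw [minimalIn_cons, minimalIn_cons, minimalIn_cons, hkeq]
          rcases tupLt (k c0) (k y) with _ | _ <;> simp
        have eq0 : minimalIn k (c0 :: c :: t) c0 = minimalIn k (c0 :: t) c0 := hcong c0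
        have eqc : minimalIn k (c0 :: c :: t) c = minimalIn k (c0 :: t) c0 :=
          (hcong c).trans (minimalIn_key_congr k (c0 :: t) hkeq)
        have ht : t.filter (minimalIn k (c0 :: c :: t)) = t.filter (minimalIn k (c0 :: t)) :=
          List.filter_congr (fun y _ => hcong y)
        simp only [List.filter_cons, eq0, eqc, ht]
        cases hp : minimalIn k (c0 :: t) c0 <;> simp

theorem mem_enum_iff (b : List String) (i : Nat) (c : String) :
    ((i : Int), c) ∈ PySem.List.enumerate b 0 ↔ b[i]? = some c := by
  rw [PySem.List.mem_enumerate_iff]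
  constructor
  · rintro ⟨k', hk', he⟩
    have h1 : (i : Int) = 0 + (k' : Int) := congrArg Prod.fst he
    have h2 : k' = i := by omega
    subst h2
    have : c = b[k'] := congrArg Prod.snd he
    simp [List.getElem?_eq_some_iff, hk', this.symm]
  · intro h
    rw [List.getElem?_eq_some_iff] at h
    obtain ⟨hlt, he⟩ := h
    exact ⟨i, hlt, by simp [he]⟩

theorem length_pySetD {α : Type} (xs : List α) (i : Int) (v : α) :
    (PySem.List.pySetD xs i v).length = xs.length := by
  unfold PySem.List.pySetD PySem.List.pySet?
  cases h : PySem.List.pyIdx? xs.length i <;> simp [h]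

-- the per-candidate invariant of B's counting fold

def BInv (cs : List String) (d : PySem.Dict String (List Int)) : Prop :=
  (∀ x, d.contains x = cs.contains x) ∧
  (∀ c, cs.contains c = true → (d.getD c []).length = cs.length)

theorem binv_init (cs : List String) :
    BInv cs (cs.foldl (fun d c => d.insert c (List.replicate cs.length (0 : Int))) PySem.Dict.empty)
    ∧ ∀ c, cs.contains c = true →
      (cs.foldl (fun d c => d.insert c (List.replicate cs.length (0 : Int))) PySem.Dict.empty).getD c []
        = List.replicate cs.length (0 : Int) := by
  have key : ∀ (l : List String) (d : PySem.Dict String (List Int)),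
      (∀ x, (l.foldl (fun d c => d.insert c (List.replicate cs.length 0)) d).contains x
          = (d.contains x || l.contains x)) ∧
      (∀ x, (l.foldl (fun d c => d.insert c (List.replicate cs.length 0)) d).getD x []
          = if l.contains x then List.replicate cs.length 0 else d.getD x []) := by
    intro l
    induction l with
    | nil => intro d; simp
    | cons c l ih =>
      intro d
      constructor
      · intro x
        simp only [List.foldl_cons, (ih _).1, PySem.Dict.contains_insert, List.contains_cons]
        cases h : x == c <;> simp [h]
      · intro x
        simp only [List.foldl_cons, (ih _).2, PySem.Dict.getD_insert, List.contains_cons]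
        by_cases h1 : x ∈ l
        · simp [h1]
        · by_cases h2 : x = c <;> simp [h1, h2]
  constructor
  · constructor
    · intro x
      rw [(key cs PySem.Dict.empty).1 x, PySem.Dict.contains_empty]
      simp
    · intro c hc
      have h := (key cs PySem.Dict.empty).2 c
      rw [if_pos hc] at h
      rw [h]; simp
  · intro c hc
    have h := (key cs PySem.Dict.empty).2 c
    rw [if_pos hc] at h
    exact h

theorem b_inner_step (cs : List String) (k : Int) (d : PySem.Dict String (List Int))
    (hinv : BInv cs d) (p : Int) (x : String) (hp : 0 ≤ p) :
    BInv cs (if p < (cs.length : Int) && d.contains x then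
        d.modify x [] (fun l => PySem.List.pySetD l p (PySem.List.pyGetD l p 0 + k)) else d)
    ∧ ∀ c, cs.contains c = true → ∀ i : Nat, i < cs.length →
      PySem.List.pyGetD ((if p < (cs.length : Int) && d.contains x then
          d.modify x [] (fun l => PySem.List.pySetD l p (PySem.List.pyGetD l p 0 + k)) else d).getD c [])
        (i : Int) 0
      = PySem.List.pyGetD (d.getD c []) (i : Int) 0 + (if ((i : Int), c) = (p, x) then k else 0) := by
  by_cases hg : (p < (cs.length : Int) && d.contains x) = true
  · have hdx : d.contains x = true := by
      rcases Bool.and_eq_true .. |>.mp hg with ⟨-, h⟩; exact h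
    have hcx : cs.contains x = true := by rw [← hinv.1 x]; exact hdx
    have hpn : p < (cs.length : Int) := by
      rcases Bool.and_eq_true .. |>.mp hg with ⟨h, -⟩; simpa using h
    have hlx : (d.getD x []).length = cs.length := hinv.2 x hcx
    rw [if_pos hg]
    refine ⟨⟨?_, ?_⟩, ?_⟩
    · intro y
      rw [PySem.Dict.contains_modify, ← hinv.1 y]
      cases hyx : y == x
      · simp
      · have : y = x := by simpa using hyx
        subst this; simp [hdx]
    · intro c hc
      rw [PySem.Dict.getD_modify]
      by_cases hcx2 : c = x
      · rw [if_pos hcx2, length_pySetD]; subst hcx2; exact hinv.2 c hc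
      · rw [if_neg hcx2]; exact hinv.2 c hc
    · intro c hc i hi
      rw [PySem.Dict.getD_modify]
      by_cases hcx2 : c = x
      · subst hcx2
        rw [if_pos rfl]
        have hptn : p = ((p.toNat : Nat) : Int) := (Int.toNat_of_nonneg hp).symm
        have hlen : p.toNat < (d.getD c []).length := by rw [hlx]; omega
        rw [hptn, PySem.List.pyGetD_pySetD_natCast _ _ _ _ _ hlen]
        by_cases hip : i = p.toNat
        · subst hip
          simp
        · have : ¬ ((i : Int), c) = (((p.toNat : Nat) : Int), c) := by
            simp; omega
          rw [if_neg hip, if_neg this, add_zero]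
      · rw [if_neg hcx2]
        have : ¬ ((i : Int), c) = (p, x) := by
          intro he; exact hcx2 (congrArg Prod.snd he)
        rw [if_neg this, add_zero]
  · rw [if_neg hg]
    refine ⟨hinv, ?_⟩
    intro c hc i hi
    have : ¬ ((i : Int), c) = (p, x) := by
      intro he
      have h1 : p = (i : Int) := (congrArg Prod.fst he).symm
      have h2 : x = c := (congrArg Prod.snd he).symm
      apply hg
      subst h1; subst h2
      simp only [Bool.and_eq_true]
      constructor
      · simp; omega
      · rw [hinv.1]; assumption
    rw [if_neg this, add_zero]

theorem b_enum_fold (cs : List String) (k : Int) (b : List String) :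
    ∀ (s : Int) (d : PySem.Dict String (List Int)), 0 ≤ s → BInv cs d →
    BInv cs ((PySem.List.enumerate b s).foldl (fun d pc =>
        if pc.1 < (cs.length : Int) && d.contains pc.2 then
          d.modify pc.2 [] (fun l => PySem.List.pySetD l pc.1 (PySem.List.pyGetD l pc.1 0 + k))
        else d) d)
    ∧ ∀ c, cs.contains c = true → ∀ i : Nat, i < cs.length →
      PySem.List.pyGetD (((PySem.List.enumerate b s).foldl (fun d pc =>
        if pc.1 < (cs.length : Int) && d.contains pc.2 then
          d.modify pc.2 [] (fun l => PySem.List.pySetD l pc.1 (PySem.List.pyGetD l pc.1 0 + k))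
        else d) d).getD c []) (i : Int) 0
      = PySem.List.pyGetD (d.getD c []) (i : Int) 0
        + (if ((i : Int), c) ∈ PySem.List.enumerate b s then k else 0) := by
  induction b with
  | nil => intro s d hs hinv; simp [PySem.List.enumerate_nil, hinv]
  | cons y ys ih =>
    intro s d hs hinv
    rw [PySem.List.enumerate_cons]
    simp only [List.foldl_cons]
    have hstep := b_inner_step cs k d hinv s y hs
    have hrec := ih (s + 1) _ (by omega) hstep.1
    refine ⟨hrec.1, ?_⟩
    intro c hc i hi
    rw [hrec.2 c hc i hi, hstep.2 c hc i hi]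
    by_cases h1 : ((i : Int), c) = (s, y)
    · have hnm : ((i : Int), c) ∉ PySem.List.enumerate ys (s + 1) := by
        intro hm
        rw [PySem.List.mem_enumerate_iff] at hm
        obtain ⟨k', hk', he⟩ := hm
        have hx1 : (i : Int) = s + 1 + (k' : Int) := congrArg Prod.fst he
        have hx2 : (i : Int) = s := congrArg Prod.fst h1
        omega
      rw [if_pos h1, if_neg hnm, if_pos (List.mem_cons.mpr (Or.inl h1)), add_zero]
    · by_cases h2 : ((i : Int), c) ∈ PySem.List.enumerate ys (s + 1)
      · have : ((i : Int), c) ∈ (s, y) :: PySem.List.enumerate ys (s + 1) := List.mem_cons_of_mem _ h2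
        simp only [if_neg h1, add_zero, if_pos h2, if_pos this]
      · have : ((i : Int), c) ∉ (s, y) :: PySem.List.enumerate ys (s + 1) := by
          simp [List.mem_cons, h1, h2]
        simp only [if_neg h1, add_zero, if_neg h2, if_neg this]

theorem cnt_cons (p : List String × Int) (bs : List (List String × Int)) (i : Nat) (c : String) :
    cnt (p :: bs) i c = (if p.1[i]? = some c then p.2 else 0) + cnt bs i c := by
  simp [cnt]

theorem b_ballots_fold (cs : List String) (bs : List (List String × Int)) :
    ∀ (d : PySem.Dict String (List Int)), BInv cs d →
    BInv cs (bs.foldl (fun d bc => (PySem.List.enumerate bc.1).foldl (fun d pc =>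
        if pc.1 < (cs.length : Int) && d.contains pc.2 then
          d.modify pc.2 [] (fun l => PySem.List.pySetD l pc.1 (PySem.List.pyGetD l pc.1 0 + bc.2))
        else d) d) d)
    ∧ ∀ c, cs.contains c = true → ∀ i : Nat, i < cs.length →
      PySem.List.pyGetD ((bs.foldl (fun d bc => (PySem.List.enumerate bc.1).foldl (fun d pc =>
        if pc.1 < (cs.length : Int) && d.contains pc.2 then
          d.modify pc.2 [] (fun l => PySem.List.pySetD l pc.1 (PySem.List.pyGetD l pc.1 0 + bc.2))
        else d) d) d).getD c []) (i : Int) 0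
      = PySem.List.pyGetD (d.getD c []) (i : Int) 0 + cnt bs i c := by
  induction bs with
  | nil => intro d hinv; simp [cnt, hinv]
  | cons bc bs ih =>
    intro d hinv
    simp only [List.foldl_cons]
    have hstep := b_enum_fold cs bc.2 bc.1 0 d (by omega) hinv
    have hrec := ih _ hstep.1
    refine ⟨hrec.1, ?_⟩
    intro c hc i hi
    rw [hrec.2 c hc i hi, hstep.2 c hc i hi, cnt_cons]
    by_cases h : bc.1[i]? = some c
    · have hm : ((i : Int), c) ∈ PySem.List.enumerate bc.1 0 := (mem_enum_iff bc.1 i c).mpr h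
      rw [if_pos hm, if_pos h]
      ring
    · have hm : ((i : Int), c) ∉ PySem.List.enumerate bc.1 0 := by
        rw [mem_enum_iff]; exact h
      rw [if_neg hm, if_neg h, add_zero, zero_add]

theorem cnt_le_total (bs : List (List String × Int)) (hpos : ∀ p ∈ bs, 0 ≤ p.2)
    (j : Nat) (c : String) : cnt bs j c ≤ (bs.map (fun p => p.2)).sum := by
  unfold cnt
  apply List.sum_le_sum
  intro p hp
  by_cases h : p.1[j]? = some c
  · simp [h]
  · simp only [if_neg h]
    exact hpos p hp

theorem all_congr_mem' {α : Type} (l : List α) (p q : α → Bool)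
    (h : ∀ x ∈ l, p x = q x) : l.all p = l.all q := by
  induction l with
  | nil => rfl
  | cons x xs ih =>
    simp only [List.all_cons]
    rw [h x (List.mem_cons_self ..), ih (fun y hy => h y (List.mem_cons_of_mem _ hy))]

theorem alt_counts_getD (bs : List (List String × Int)) (cs : List String)
    (c : String) (hc : c ∈ cs) (i : Nat) (hi : i < cs.length) :
    PySem.List.pyGetD ((bs.foldl (fun d bc => (PySem.List.enumerate bc.1).foldl (fun d pc =>
        if pc.1 < (cs.length : Int) && d.contains pc.2 then
          d.modify pc.2 [] (fun l => PySem.List.pySetD l pc.1 (PySem.List.pyGetD l pc.1 0 + bc.2))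
        else d) d)
      (cs.foldl (fun d c => d.insert c (List.replicate cs.length (0 : Int))) PySem.Dict.empty)).getD c [])
      (i : Int) 0 = cnt bs i c := by
  have hcc : cs.contains c = true := by simpa using hc
  have hinit := binv_init cs
  have h := (b_ballots_fold cs bs _ hinit.1).2 c hcc i hi
  rw [h, hinit.2 c hcc]
  simp [PySem.List.pyGetD_natCast, List.getD]

theorem main_eq (bs : List (List String × Int)) (cs : List String)
    (hne : cs ≠ []) (hpos : ∀ p ∈ bs, 0 ≤ p.2) :
    anti_plurality bs cs = anti_plurality_alt bs cs := by
  cases cs with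
  | nil => exact absurd rfl hne
  | cons c0 rest =>
    have hg : ∀ i ∈ PySem.List.pyRange (((c0 :: rest).length : Int) - 1) (-1) (-1), ∀ c,
        (apBuild bs).getD (i, c) 0 = cnt bs i.toNat c := by
      intro i hi c
      rw [PySem.List.mem_pyRange_neg_one] at hi
      have h0 : 0 ≤ i := by omega
      have := apBuild_getD bs i.toNat c
      rw [Int.toNat_of_nonneg h0] at this
      exact this
    have hb : ∀ i ∈ PySem.List.pyRange (((c0 :: rest).length : Int) - 1) (-1) (-1), ∀ c,
        cnt bs i.toNat c ≤ (bs.map (fun p => p.2)).sum :=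
      fun i _ c => cnt_le_total bs hpos i.toNat c
    have helim := apElim_eq_filter ((bs.map (fun p => p.2)).sum) (fun i c => cnt bs i.toNat c)
      (PySem.List.pyRange (((c0 :: rest).length : Int) - 1) (-1) (-1)) (c0 :: rest) (apBuild bs)
      hne hg hb
    have hkeyA : (fun c => (PySem.List.pyRange (((c0 :: rest).length : Int) - 1) (-1) (-1)).map
        (fun i => cnt bs i.toNat c)) = keyv bs (c0 :: rest).length := by
      funext c
      rw [PySem.List.pyRange_neg_one]
      have h1 : (((c0 :: rest).length : Int) - 1 - (-1)).toNat = (c0 :: rest).length := by omega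
      rw [h1, List.map_map]
      unfold keyv
      apply List.map_congr_left
      intro k hk
      rw [List.mem_range] at hk
      show cnt bs (((c0 :: rest).length : Int) - 1 - (k : Int)).toNat c = _
      have h2 : (((c0 :: rest).length : Int) - 1 - (k : Int)).toNat = (c0 :: rest).length - 1 - k := by
        omega
      rw [h2]
    rw [hkeyA] at helim
    -- the A side is the head of the filtered list
    have hA : anti_plurality bs (c0 :: rest)
        = (((c0 :: rest).filter (minimalIn (keyv bs (c0 :: rest).length) (c0 :: rest))).head?).getD "" := by
      simp only [anti_plurality]
      rw [helim, PySem.List.pyGet?_zero, ← List.head?_eq_getElem?]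
    -- the B side
    have hB : some (anti_plurality_alt bs (c0 :: rest))
        = ((c0 :: rest).filter (minimalIn (keyv bs (c0 :: rest).length) (c0 :: rest))).head? := by
      simp only [anti_plurality_alt]
      have hlenK : ∀ (counts : PySem.Dict String (List Int)) (x : String),
          (altKey counts (c0 :: rest).length x).length = (c0 :: rest).length := by
        intro counts x
        unfold altKey
        rw [List.length_map, PySem.List.length_pyRange_one]
        omega
      have hfs := foldSel (altKey (bs.foldl (fun d bc => (PySem.List.enumerate bc.1).foldl (fun d pc =>
          if pc.1 < ((c0 :: rest).length : Int) && d.contains pc.2 then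
            d.modify pc.2 [] (fun l => PySem.List.pySetD l pc.1 (PySem.List.pyGetD l pc.1 0 + bc.2))
          else d) d)
        ((c0 :: rest).foldl (fun d c => d.insert c (List.replicate (c0 :: rest).length (0 : Int))) PySem.Dict.empty)) (c0 :: rest).length)
        (fun a b h1 h2 => tupLt_eq_of_not (by rw [hlenK, hlenK]) h1 h2) rest c0
      rw [hfs]
      -- exchange the key function for keyv on members
      have hkB : ∀ c ∈ (c0 :: rest), altKey (bs.foldl (fun d bc => (PySem.List.enumerate bc.1).foldl (fun d pc =>
          if pc.1 < ((c0 :: rest).length : Int) && d.contains pc.2 then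
            d.modify pc.2 [] (fun l => PySem.List.pySetD l pc.1 (PySem.List.pyGetD l pc.1 0 + bc.2))
          else d) d)
        ((c0 :: rest).foldl (fun d c => d.insert c (List.replicate (c0 :: rest).length (0 : Int))) PySem.Dict.empty)) (c0 :: rest).length c
          = keyv bs (c0 :: rest).length c := by
        intro c hc
        unfold altKey keyv
        rw [PySem.List.pyRange_one]
        have h1 : (((c0 :: rest).length : Int) - 0).toNat = (c0 :: rest).length := by omega
        rw [h1, List.map_map]
        apply List.map_congr_left
        intro k hk
        rw [List.mem_range] at hk
        have hidx : (((c0 :: rest).length : Int) - 1 - (0 + (k : Int)))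
            = (((c0 :: rest).length - 1 - k : Nat) : Int) := by omega
        show PySem.List.pyGetD _ (((c0 :: rest).length : Int) - 1 - (0 + (k : Int))) 0 = _
        rw [hidx]
        exact alt_counts_getD bs (c0 :: rest) c hc ((c0 :: rest).length - 1 - k) (by omega)
      congr 1
      apply List.filter_congr
      intro c hc
      unfold minimalIn
      rw [hkB c hc]
      exact all_congr_mem' _ _ _ (fun c' hc' => by rw [hkB c' hc'])
    rw [hA, ← hB]
    rfl

-- ===== VERDICT (by name: the statement is the Claim_ definition above) =====
theorem anti_plurality_spec : Claim_equal_anti_plurality := by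
  unfold Claim_equal_anti_plurality
  intro bs cs hdom hpre
  unfold Spec_anti_plurality
  exact main_eq bs cs hpre.1 hpre.2
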